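-- pv_equiv track=rewrite | github.com/felipe-dachshund/prime-layer-system | layer_system.py | generate_composites
-- ===== SOURCE A (Python) =====
-- from typing import List, Tuple, Dict, Optional
--
-- def generate_composites(n: int) -> List[int]:
--     """
--     Generate the first n composite numbers.
--
--     Args:
--         n: Number of composites to generate
--
--     Returns:
--         List of first n composite numbers (4, 6, 8, 9, 10, ...)
--     """
--     if n <= 0:
--         return []
--
--     composites = []
--     num = 4  # First composite
--
--     while len(composites) < n:
--         # Check if num is composite (not prime)
--         is_composite = True
--         if num < 2:
--             is_composite = False
--         elif num == 2:
--             is_composite = False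
--         elif num % 2 == 0:
--             is_composite = True
--         else:
--             for i in range(3, int(num ** 0.5) + 1, 2):
--                 if num % i == 0:
--                     is_composite = True
--                     break
--             else:
--                 is_composite = False
--
--         if is_composite:
--             composites.append(num)
--         num += 1
--
--     return composites
-- ===== SOURCE B (Python) =====
-- from typing import List
--
--
-- def generate_composites(n: int) -> List[int]:
--     """Generate the first n composite numbers via a sieve over a fixed bound."""
--     if n <= 0:
--         return []
--     limit = 2 * n + 5  # [4, 2n+5] contains at least n composites (the evens 4..2n+4)
--     sieve = [False] * (limit + 1)
--     for p in range(2, int(limit ** 0.5) + 1):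
--         for m in range(p * p, limit + 1, p):
--             sieve[m] = True
--     return [i for i in range(4, limit + 1) if sieve[i]][:n]
-- ===== Notes on version B (the rewrite author's own statement) =====
-- stated objective: faster
-- what changed: Replaces per-candidate trial division (testing each number up to its square root) with a single sieve of Eratosthenes over the fixed bound 2n+5, then collecting the marked numbers from 4 up and taking the first n.
import Mathlib
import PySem

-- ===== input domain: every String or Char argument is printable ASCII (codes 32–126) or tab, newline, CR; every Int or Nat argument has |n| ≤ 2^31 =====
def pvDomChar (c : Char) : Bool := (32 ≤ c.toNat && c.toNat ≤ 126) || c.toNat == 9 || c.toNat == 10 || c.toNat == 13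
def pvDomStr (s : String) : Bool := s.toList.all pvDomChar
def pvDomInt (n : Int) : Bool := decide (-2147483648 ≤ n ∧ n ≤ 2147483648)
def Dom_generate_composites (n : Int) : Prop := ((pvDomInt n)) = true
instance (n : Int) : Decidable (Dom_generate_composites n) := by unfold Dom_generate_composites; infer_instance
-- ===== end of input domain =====

-- B replaces A's candidate-by-candidate trial division with a sieve of Eratosthenes
-- over the fixed bound 2n+5; equivalence: both return the first n composites.


-- ===== PORT A =====
-- the body of A's while loop deciding whether num is composite;
-- int(num ** 0.5) is ported as Nat.sqrt, exact for 0 ≤ num < 2^52 (here num ≤ 2n+7 ≤ 2^32+7)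
def isCompositeA (num : Int) : Bool :=
  if num < 2 then false
  else if num = 2 then false
  else if PySem.Int.mod num 2 = 0 then true
  else (PySem.List.pyRange 3 ((Nat.sqrt num.toNat : Int) + 1) 2).any
         (fun i => PySem.Int.mod num i == 0)

-- the while loop; fuel bounds the iteration count: 2n+2 iterations always suffice,
-- since the candidates 4..2n+5 contain the n+1 even composites 4,6,..,2n+4
def loopA (n : Int) : List Int → Int → Nat → List Int
  | composites, _, 0 => composites
  | composites, num, fuel + 1 =>
    if (composites.length : Int) < n then
      loopA n (if isCompositeA num then composites ++ [num] else composites) (num + 1) fuel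
    else composites

def generate_composites (n : Int) : List Int :=
  if n ≤ 0 then [] else loopA n [] 4 (2 * n + 2).toNat

-- ===== PORT B =====
-- inner loop: for m in range(p*p, limit+1, p): sieve[m] = True
-- (m ≥ p*p ≥ 4 > 0 and m ≤ limit, so m.toNat is the Python index, always in range)
def sieveMark (limit : Int) (s : List Bool) (p : Int) : List Bool :=
  (PySem.List.pyRange (p * p) (limit + 1) p).foldl (fun s m => s.set m.toNat true) s

def generate_composites_alt (n : Int) : List Int :=
  if n ≤ 0 then [] else
    let limit := 2 * n + 5
    -- int(limit ** 0.5) ported as Nat.sqrt, exact for limit ≤ 2^32+7 < 2^52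
    let sieve := (PySem.List.pyRange 2 ((Nat.sqrt limit.toNat : Int) + 1) 1).foldl
                   (sieveMark limit) (List.replicate (limit + 1).toNat false)
    -- sieve[i] for 4 ≤ i ≤ limit is always in range, so List.getD is Python's indexing
    PySem.List.slice ((PySem.List.pyRange 4 (limit + 1) 1).filter
                        (fun i => sieve.getD i.toNat false)) none (some n)

-- ===== PRECONDITION & SPEC =====
def Spec_generate_composites (n : Int) (out : List Int) : Prop := out = generate_composites_alt n
instance (n : Int) (out : List Int) : Decidable (Spec_generate_composites n out) := by unfold Spec_generate_composites; infer_instance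

-- ===== CLAIM (what is proved, stated in full; the proofs are below) =====
def Claim_equal_generate_composites : Prop := ∀ (n : Int), Dom_generate_composites n → Spec_generate_composites n (generate_composites n)

-- ===== LEMMAS AND PROOFS =====

-- A's candidate list: fuel consecutive integers starting at num
def cands (num : Int) : Nat → List Int
  | 0 => []
  | fuel + 1 => num :: cands (num + 1) fuel

lemma cands_eq_pyRange (fuel : Nat) : ∀ num : Int,
    cands num fuel = PySem.List.pyRange num (num + fuel) 1 := by
  induction fuel with
  | zero => intro num; simp [cands, PySem.List.pyRange_one_eq_nil]
  | succ f ih =>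
    intro num
    have hb : num + ((f + 1 : Nat) : Int) = (num + 1) + (f : Nat) := by push_cast; ring
    rw [cands, ih (num + 1), hb]
    exact (PySem.List.pyRange_one_cons (by omega)).symm

lemma loopA_eq (n : Int) (hn : 0 ≤ n) : ∀ (fuel : Nat) (acc : List Int) (num : Int),
    loopA n acc num fuel
      = acc ++ ((cands num fuel).filter isCompositeA).take (n.toNat - acc.length) := by
  intro fuel
  induction fuel with
  | zero => intro acc num; simp [loopA, cands]
  | succ f ih =>
    intro acc num
    rw [loopA, cands]
    by_cases hc : (acc.length : Int) < n
    · rw [if_pos hc]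
      by_cases hcomp : isCompositeA num
      · rw [if_pos hcomp, ih (acc ++ [num]) (num + 1), List.filter_cons_of_pos hcomp]
        have hts : n.toNat - acc.length = (n.toNat - (acc ++ [num]).length) + 1 := by
          simp only [List.length_append, List.length_cons, List.length_nil]; omega
        rw [hts, List.take_succ_cons, List.append_assoc]
        rfl
      · rw [if_neg hcomp, ih acc (num + 1), List.filter_cons_of_neg hcomp]
    · rw [if_neg hc]
      have : n.toNat - acc.length = 0 := by omega
      rw [this, List.take_zero, List.append_nil]

-- true composites as a Nat predicate
lemma not_prime_iff_small_divisor (M : Nat) (hM : 4 ≤ M) :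
    ¬ M.Prime ↔ ∃ q : Nat, 2 ≤ q ∧ q * q ≤ M ∧ q ∣ M := by
  constructor
  · intro h
    refine ⟨M.minFac, (Nat.minFac_prime (by omega)).two_le, ?_, M.minFac_dvd⟩
    have := Nat.minFac_sq_le_self (by omega) h
    simpa [pow_two] using this
  · rintro ⟨q, hq2, hqq, hdvd⟩
    intro hp
    rcases (hp.eq_one_or_self_of_dvd q hdvd) with h1 | h1
    · omega
    · nlinarith [hqq]

lemma isCompositeA_iff (i : Int) (hi : 4 ≤ i) :
    isCompositeA i = true ↔ ¬ (i.toNat).Prime := by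
  have hi0 : (0 : Int) ≤ i := by omega
  have hiM : ((i.toNat : Int)) = i := Int.toNat_of_nonneg hi0
  rw [isCompositeA, if_neg (by omega), if_neg (by omega)]
  by_cases heven : PySem.Int.mod i 2 = 0
  · rw [if_pos heven]
    have h2 : (2 : Int) ∣ i := (PySem.Int.mod_eq_zero_iff_dvd i 2).mp heven
    have h2n : 2 ∣ i.toNat := by
      have : ((2 : Nat) : Int) ∣ (i.toNat : Int) := by rw [hiM]; exact_mod_cast h2
      exact_mod_cast this
    simp only [true_iff]
    rw [not_prime_iff_small_divisor _ (by omega)]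
    exact ⟨2, le_refl 2, by omega, h2n⟩
  · rw [if_neg heven, List.any_eq_true]
    have hodd : ¬ (2 ∣ i.toNat) := by
      intro h
      apply heven
      rw [PySem.Int.mod_eq_zero_iff_dvd]
      have : ((2 : Nat) : Int) ∣ (i.toNat : Int) := by exact_mod_cast h
      rwa [hiM] at this
    constructor
    · rintro ⟨j, hj, hdvd⟩
      rw [PySem.List.mem_pyRange_iff_of_pos (by omega)] at hj
      obtain ⟨hj3, hjlt, -⟩ := hj
      have hjd : j ∣ i := by
        rw [beq_iff_eq] at hdvd
        exact (PySem.Int.mod_eq_zero_iff_dvd i j).mp hdvd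
      rw [not_prime_iff_small_divisor _ (by omega)]
      refine ⟨j.toNat, by omega, ?_, ?_⟩
      · have hle : j.toNat ≤ Nat.sqrt i.toNat := by omega
        exact Nat.le_sqrt.mp hle
      · have : ((j.toNat : Int)) ∣ (i.toNat : Int) := by
          rw [Int.toNat_of_nonneg (by omega : (0:Int) ≤ j), hiM]; exact hjd
        exact_mod_cast this
    · intro hnp
      rw [not_prime_iff_small_divisor _ (by omega)] at hnp
      set M := i.toNat with hM
      have hM4 : 4 ≤ M := by omega
      have hMpos : 0 < M := by omega
      have hnp' : ¬ M.Prime := by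
        rw [not_prime_iff_small_divisor _ hM4]; exact hnp
      have hqp : (M.minFac).Prime := Nat.minFac_prime (by omega)
      have hqd : M.minFac ∣ M := Nat.minFac_dvd M
      have hqq : M.minFac * M.minFac ≤ M := by
        have := Nat.minFac_sq_le_self hMpos hnp'
        simpa [pow_two] using this
      have hq2 : M.minFac ≠ 2 := by
        intro h; exact hodd (h ▸ hqd)
      have hq3 : 3 ≤ M.minFac := by
        have := hqp.two_le
        omega
      have hqodd : M.minFac % 2 = 1 := by
        rcases hqp.eq_two_or_odd with h | h
        · omega
        · exact h
      refine ⟨(M.minFac : Int), ?_, ?_⟩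
      · rw [PySem.List.mem_pyRange_iff_of_pos (by omega)]
        refine ⟨by exact_mod_cast hq3, ?_, by omega⟩
        have hsq : M.minFac ≤ Nat.sqrt M := Nat.le_sqrt.mpr hqq
        omega
      · rw [beq_iff_eq, PySem.Int.mod_eq_zero_iff_dvd]
        have : ((M.minFac : Int)) ∣ (M : Int) := by exact_mod_cast hqd
        rwa [hiM] at this

-- characterization of the sieve lookup
lemma length_foldl_set (L : List Int) (s : List Bool) :
    (L.foldl (fun s m => s.set m.toNat true) s).length = s.length := by
  induction L generalizing s with
  | nil => rfl
  | cons m L ih => rw [List.foldl_cons, ih, List.length_set]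

lemma getD_foldl_set (L : List Int) (s : List Bool) (j : Nat) (hj : j < s.length) :
    (L.foldl (fun s m => s.set m.toNat true) s).getD j false
      = (s.getD j false || L.any (fun m => m.toNat == j)) := by
  induction L generalizing s with
  | nil => simp
  | cons m L ih =>
    rw [List.foldl_cons, ih _ (by rw [List.length_set]; exact hj)]
    by_cases hm : m.toNat = j
    · simp [List.getD_eq_getElem?_getD, hm, hj]
    · have hb : (m.toNat == j) = false := by simpa using hm
      simp [List.getD_eq_getElem?_getD, hm, hb]

lemma getD_foldl_mark (limit : Int) (P : List Int) (hP : ∀ p ∈ P, 0 < p)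
    (s : List Bool) (j : Nat) (hj : j < s.length) :
    (P.foldl (sieveMark limit) s).getD j false
      = (s.getD j false ||
          P.any (fun p => (PySem.List.pyRange (p * p) (limit + 1) p).any (fun m => m.toNat == j))) := by
  induction P generalizing s with
  | nil => simp
  | cons p P ih =>
    rw [List.foldl_cons]
    have hlen : (sieveMark limit s p).length = s.length := length_foldl_set _ _
    rw [ih (fun q hq => hP q (List.mem_cons_of_mem _ hq)) _ (by rw [hlen]; exact hj),
        sieveMark, getD_foldl_set _ _ _ hj, List.any_cons, Bool.or_assoc]

lemma sieve_getD_iff (limit : Int) (hlim : 4 ≤ limit) (i : Int) (hi : 4 ≤ i) (hile : i ≤ limit) :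
    ((PySem.List.pyRange 2 ((Nat.sqrt limit.toNat : Int) + 1) 1).foldl
        (sieveMark limit) (List.replicate (limit + 1).toNat false)).getD i.toNat false = true
      ↔ ¬ (i.toNat).Prime := by
  have hi0 : (0 : Int) ≤ i := by omega
  have hiM : ((i.toNat : Int)) = i := Int.toNat_of_nonneg hi0
  have hj : i.toNat < (List.replicate (limit + 1).toNat false).length := by
    rw [List.length_replicate]; omega
  rw [getD_foldl_mark limit _
        (fun p hp => by rw [PySem.List.mem_pyRange_one] at hp; omega) _ i.toNat hj]
  have hrep : (List.replicate (limit + 1).toNat false).getD i.toNat false = false := by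
    rw [List.getD_eq_getElem?_getD, List.getElem?_replicate, if_pos (by omega)]; rfl
  rw [hrep, Bool.false_or, List.any_eq_true, not_prime_iff_small_divisor _ (by omega)]
  constructor
  · rintro ⟨p, hp, hinner⟩
    rw [PySem.List.mem_pyRange_one] at hp
    rw [List.any_eq_true] at hinner
    obtain ⟨m, hm, hmj⟩ := hinner
    rw [PySem.List.mem_pyRange_iff_of_pos (by omega)] at hm
    obtain ⟨h1, h2, h3⟩ := hm
    have hpp4 : 4 ≤ p * p := by nlinarith [hp.1]
    have hmeq : m = i := by
      rw [beq_iff_eq] at hmj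
      omega
    subst hmeq
    have hpi : p ∣ m := by
      have := dvd_add h3 (dvd_mul_left p p)
      simpa using this
    refine ⟨p.toNat, by omega, ?_, ?_⟩
    · have hc : ((p.toNat * p.toNat : Nat) : Int) ≤ ((m.toNat : Nat) : Int) := by
        push_cast
        rw [Int.toNat_of_nonneg (by omega : (0:Int) ≤ p), hiM]
        omega
      exact_mod_cast hc
    · have : ((p.toNat : Int)) ∣ ((m.toNat : Int)) := by
        rw [Int.toNat_of_nonneg (by omega : (0:Int) ≤ p), hiM]; exact hpi
      exact_mod_cast this
  · rintro ⟨q, hq2, hqq, hqd⟩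
    have hqlim : q ≤ Nat.sqrt limit.toNat := by
      apply Nat.le_sqrt.mpr
      have : i.toNat ≤ limit.toNat := by omega
      omega
    refine ⟨(q : Int), ?_, ?_⟩
    · rw [PySem.List.mem_pyRange_one]
      constructor
      · exact_mod_cast hq2
      · have : ((q : Int)) ≤ ((Nat.sqrt limit.toNat : Nat) : Int) := by exact_mod_cast hqlim
        omega
    · rw [List.any_eq_true]
      refine ⟨i, ?_, by simp⟩
      rw [PySem.List.mem_pyRange_iff_of_pos (by exact_mod_cast (by omega : 0 < q))]
      have hqd' : ((q : Int)) ∣ i := by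
        have : ((q : Int)) ∣ ((i.toNat : Int)) := by exact_mod_cast hqd
        rwa [hiM] at this
      refine ⟨?_, by omega, ?_⟩
      · have : ((q * q : Nat) : Int) ≤ ((i.toNat : Nat) : Int) := by exact_mod_cast hqq
        rw [hiM] at this
        push_cast at this ⊢
        omega
      · exact dvd_sub hqd' (dvd_mul_left _ _)

-- ===== VERDICT (by name: the statement is the Claim_ definition above) =====
theorem generate_composites_spec : Claim_equal_generate_composites := by
  intro n _
  unfold Spec_generate_composites generate_composites generate_composites_alt
  by_cases h0 : n ≤ 0
  · simp [h0]
  · simp only [if_neg h0]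
    rw [loopA_eq n (by omega) (2 * n + 2).toNat [] 4,
        cands_eq_pyRange, PySem.List.slice_to _ (show (0:Int) ≤ n by omega)]
    simp only [List.nil_append, List.length_nil, Nat.sub_zero]
    have hcand : (4 : Int) + ((2 * n + 2).toNat : Int) = 2 * n + 5 + 1 := by omega
    rw [hcand]
    congr 1
    apply List.filter_congr
    intro i hi
    rw [PySem.List.mem_pyRange_one] at hi
    have h4 : 4 ≤ i := hi.1
    rw [Bool.eq_iff_iff, isCompositeA_iff i h4,
        sieve_getD_iff (2 * n + 5) (by omega) i h4 (by omega)]
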